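-- pv_equiv track=rewrite | github.com/Kanaries/pygwalker | pygwalker/renderers/base.py | auto_mark
-- ===== SOURCE A (Python) =====
-- def auto_mark(sub_view_fields_semantic_types):
--     """
--     Determine the appropriate mark type based on semantic types.
--     Args:
--         sub_view_fields_semantic_types: List of semantic types, max length 2
--     Returns:
--         str: The recommended mark type
--     """
--     if len(sub_view_fields_semantic_types) < 2:
--         if sub_view_fields_semantic_types[0] in ["temporal", "quantitative"]:
--             return "tick"
--         return "bar"
--
--     counter = {
--         "nominal": 0,
--         "ordinal": 0,
--         "quantitative": 0,
--         "temporal": 0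
--     }
--
--     for st in sub_view_fields_semantic_types:
--         counter[st] = counter.get(st, 0) + 1
--
--     if counter["nominal"] == 1 or counter["ordinal"] == 1:
--         return "bar"
--
--     if counter["temporal"] == 1 and counter["quantitative"] == 1:
--         return "line"
--
--     if counter["quantitative"] == 2:
--         return "point"
--
--     return "point"
-- ===== SOURCE B (Python) =====
-- def auto_mark(sub_view_fields_semantic_types):
--     """Alternative: sort-then-scan. Group the sorted list into runs and collect the
--     values occurring exactly once; decide the mark from that singles list instead of
--     maintaining a frequency dict."""
--     if len(sub_view_fields_semantic_types) < 2:
--         if sub_view_fields_semantic_types[0] in ["temporal", "quantitative"]: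
--             return "tick"
--         return "bar"
--     singles = [v for v, n in _runs(sorted(sub_view_fields_semantic_types)) if n == 1]
--     if "nominal" in singles or "ordinal" in singles:
--         return "bar"
--     if "temporal" in singles and "quantitative" in singles:
--         return "line"
--     return "point"
--
--
-- def _runs(ts):
--     """Run-length encode a list: one (value, length of its contiguous run) per run."""
--     runs = []
--     i = 0
--     while i < len(ts):
--         j = i + 1
--         while j < len(ts) and ts[j] == ts[i]:
--             j += 1
--         runs.append((ts[i], j - i))
--         i = j
--     return runs
-- ===== Notes on version B (the rewrite author's own statement) =====
-- stated objective: alternative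
-- what changed: Replaces A's streaming frequency-dict counter with a sort-then-scan algorithm: sort the list, run-length-encode it into contiguous runs, collect the values whose run has length 1, and decide the mark from that singles list.
-- outside the precondition, e.g. on auto_mark([]): A raises IndexError, B raises IndexError
import Mathlib
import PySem

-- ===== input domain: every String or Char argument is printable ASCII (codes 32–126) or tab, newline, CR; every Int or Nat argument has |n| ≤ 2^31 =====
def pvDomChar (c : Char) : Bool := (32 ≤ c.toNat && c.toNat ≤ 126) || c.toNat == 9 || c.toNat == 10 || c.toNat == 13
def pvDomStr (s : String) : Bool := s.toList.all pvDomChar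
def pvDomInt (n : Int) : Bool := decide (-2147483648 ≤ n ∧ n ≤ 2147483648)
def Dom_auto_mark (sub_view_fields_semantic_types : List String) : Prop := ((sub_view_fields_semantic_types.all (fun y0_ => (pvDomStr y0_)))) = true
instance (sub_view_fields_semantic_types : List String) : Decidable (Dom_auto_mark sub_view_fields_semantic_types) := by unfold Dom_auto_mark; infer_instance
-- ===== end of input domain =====

-- B replaces A's streaming frequency dict by sort + run-length encoding + a singles list (objective: alternative).

-- ===== PORT A =====
def auto_mark (sub_view_fields_semantic_types : List String) : String :=
  if sub_view_fields_semantic_types.length < 2 then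
    match PySem.List.pyGet? sub_view_fields_semantic_types 0 with
    | none => ""   -- IndexError on the empty list; excluded by Pre_auto_mark
    | some s => if s = "temporal" ∨ s = "quantitative" then "tick" else "bar"
  else
    let counter : PySem.Dict String Int :=
      PySem.Dict.ofList [("nominal", 0), ("ordinal", 0), ("quantitative", 0), ("temporal", 0)]
    let counter := sub_view_fields_semantic_types.foldl
      (fun c st => PySem.Dict.insert c st (PySem.Dict.getD c st 0 + 1)) counter
    if PySem.Dict.getD counter "nominal" 0 = 1 ∨ PySem.Dict.getD counter "ordinal" 0 = 1 then
      "bar"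
    else if PySem.Dict.getD counter "temporal" 0 = 1 ∧ PySem.Dict.getD counter "quantitative" 0 = 1 then
      "line"
    else if PySem.Dict.getD counter "quantitative" 0 = 2 then
      "point"
    else
      "point"

-- ===== PORT B =====
-- Source B's _runs: run-length encoding. Each outer-loop iteration emits one run: the inner
-- scan to j is the takeWhile equal-prefix, and advancing i to j continues on the dropWhile
-- remainder; exact on every list.
def pvRuns (ts : List String) : List (String × Nat) :=
  match ts with
  | [] => []
  | v :: rest =>
      (v, 1 + (rest.takeWhile (fun x => x == v)).length) :: pvRuns (rest.dropWhile (fun x => x == v))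
  termination_by ts.length
  decreasing_by
    simp only [List.length_cons]
    exact Nat.lt_succ_of_le (List.length_dropWhile_le _ _)

def auto_mark_alt (sub_view_fields_semantic_types : List String) : String :=
  if sub_view_fields_semantic_types.length < 2 then
    match PySem.List.pyGet? sub_view_fields_semantic_types 0 with
    | none => ""   -- IndexError on the empty list; excluded by Pre_auto_mark
    | some s => if s = "temporal" ∨ s = "quantitative" then "tick" else "bar"
  else
    let singles :=
      ((pvRuns (PySem.List.sorted sub_view_fields_semantic_types (fun x => x) false)).filter
        (fun p => p.2 == 1)).map Prod.fst
    if "nominal" ∈ singles ∨ "ordinal" ∈ singles then "bar"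
    else if "temporal" ∈ singles ∧ "quantitative" ∈ singles then "line"
    else "point"

-- ===== PRECONDITION & SPEC =====
-- Pre_ excludes only the empty list, on which A (and B) raise IndexError at [0].
def Pre_auto_mark (sub_view_fields_semantic_types : List String) : Prop :=
  sub_view_fields_semantic_types ≠ []
instance (sub_view_fields_semantic_types : List String) : Decidable (Pre_auto_mark sub_view_fields_semantic_types) := by unfold Pre_auto_mark; infer_instance
def pvWitness_auto_mark : List String := ["nominal", "quantitative"]

def Spec_auto_mark (sub_view_fields_semantic_types : List String) (out : String) : Prop := out = auto_mark_alt sub_view_fields_semantic_types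
instance (sub_view_fields_semantic_types : List String) (out : String) : Decidable (Spec_auto_mark sub_view_fields_semantic_types out) := by unfold Spec_auto_mark; infer_instance

-- ===== CLAIM =====
def Claim_equal_auto_mark : Prop := ∀ (sub_view_fields_semantic_types : List String), Dom_auto_mark sub_view_fields_semantic_types → Pre_auto_mark sub_view_fields_semantic_types → Spec_auto_mark sub_view_fields_semantic_types (auto_mark sub_view_fields_semantic_types)

-- ===== LEMMAS AND PROOFS =====

-- A's initial dict maps every key to 0 (present keys carry 0; absent keys fall to the default 0).
theorem getD_init (k : String) :
    (PySem.Dict.ofList [("nominal", (0:Int)), ("ordinal", 0), ("quantitative", 0), ("temporal", 0)]).getD k 0 = 0 := by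
  have hitems : (PySem.Dict.ofList [("nominal", (0:Int)), ("ordinal", 0), ("quantitative", 0), ("temporal", 0)]).items
      = [("nominal", 0), ("ordinal", 0), ("quantitative", 0), ("temporal", 0)] := by rfl
  simp [PySem.Dict.getD, PySem.Dict.get?, hitems, List.find?_cons]
  cases "nominal" == k <;> cases "ordinal" == k <;> cases "quantitative" == k <;> cases "temporal" == k <;> simp

-- A's loop 'counter[st] = counter.get(st, 0) + 1' leaves, at any key k, the initial value plus the count.
theorem getD_foldl_insert_count (xs : List String) (d : PySem.Dict String Int) (k : String) :
    (xs.foldl (fun c st => PySem.Dict.insert c st (PySem.Dict.getD c st 0 + 1)) d).getD k 0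
      = d.getD k 0 + xs.count k := by
  induction xs generalizing d with
  | nil => simp
  | cons x xs ih =>
    simp only [List.foldl_cons, ih, List.count_cons, PySem.Dict.getD_insert]
    by_cases h : k = x
    · simp [h]; ring
    · simp [h]; exact fun hxk => h hxk.symm

-- On a ≤-sorted list, a run of length 1 at v is exactly 'v occurs once in the list'.
theorem mem_runs_one_iff : ∀ (l : List String), l.Pairwise (· ≤ ·) →
    ∀ v, ((v, 1) ∈ pvRuns l ↔ l.count v = 1) := by
  intro l
  induction l using pvRuns.induct with
  | case1 => intro _ v; simp [pvRuns]
  | case2 v₀ rest ih =>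
    intro hp v
    have hsplit : rest.takeWhile (fun x => x == v₀) ++ rest.dropWhile (fun x => x == v₀) = rest :=
      List.takeWhile_append_dropWhile
    have htv : ∀ x ∈ rest.takeWhile (fun x => x == v₀), x = v₀ := fun x hx => by
      simpa using List.mem_takeWhile_imp hx
    have hdsub : (rest.dropWhile (fun x => x == v₀)).Sublist rest := List.dropWhile_sublist _
    have hdp : (rest.dropWhile (fun x => x == v₀)).Pairwise (· ≤ ·) :=
      (List.pairwise_cons.mp hp).2.sublist hdsub
    have hrestle : ∀ x ∈ rest, v₀ ≤ x := (List.pairwise_cons.mp hp).1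
    have hvd : v₀ ∉ rest.dropWhile (fun x => x == v₀) := by
      intro hmem
      have hne : rest.dropWhile (fun x => x == v₀) ≠ [] := List.ne_nil_of_mem hmem
      have hhead := List.head_dropWhile_not (fun x => x == v₀) hne
      have hwne : (rest.dropWhile (fun x => x == v₀)).head hne ≠ v₀ := by simpa using hhead
      have hwmem := hdsub.mem (List.head_mem hne)
      have h1 : v₀ ≤ (rest.dropWhile (fun x => x == v₀)).head hne := hrestle _ hwmem
      have hcons := List.cons_head_tail hne
      rw [← hcons] at hmem hdp
      rcases List.mem_cons.mp hmem with h | h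
      · exact hwne h.symm
      · have h2 := (List.pairwise_cons.mp hdp).1 _ h
        exact hwne (le_antisymm h2 h1)
    have hdcount0 : (rest.dropWhile (fun x => x == v₀)).count v₀ = 0 :=
      List.count_eq_zero.mpr hvd
    have hcount_rest : rest.count v₀ = (rest.takeWhile (fun x => x == v₀)).length := by
      have ht : (rest.takeWhile (fun x => x == v₀)).count v₀
          = (rest.takeWhile (fun x => x == v₀)).length :=
        List.count_eq_length.mpr (fun x hx => (htv x hx).symm)
      have h2 : (rest.takeWhile (fun x => x == v₀) ++ rest.dropWhile (fun x => x == v₀)).count v₀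
          = (rest.takeWhile (fun x => x == v₀)).length := by
        rw [List.count_append, ht, hdcount0]
        omega
      rw [hsplit] at h2
      exact h2
    simp only [pvRuns, List.mem_cons]
    rw [ih hdp v]
    by_cases hv : v = v₀
    · subst hv
      simp only [Prod.mk.injEq, List.count_cons_self, true_and]
      constructor
      · rintro (h | h) <;> omega
      · intro h
        left
        omega
    · have hvt : (rest.takeWhile (fun x => x == v₀)).count v = 0 :=
        List.count_eq_zero.mpr (fun hx => hv (htv v hx))
      have hc : rest.count v = (rest.dropWhile (fun x => x == v₀)).count v := by
        have h2 : (rest.takeWhile (fun x => x == v₀) ++ rest.dropWhile (fun x => x == v₀)).count v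
            = (rest.dropWhile (fun x => x == v₀)).count v := by
          rw [List.count_append, hvt, Nat.zero_add]
        rw [hsplit] at h2
        exact h2
      simp only [List.count_cons, hc]
      simp [Prod.mk.injEq, hv, Ne.symm hv]

-- Membership in B's singles list is 'v occurs exactly once in xs'.
theorem mem_singles_iff (xs : List String) (v : String) :
    v ∈ ((pvRuns (PySem.List.sorted xs (fun x => x) false)).filter
        (fun p => p.2 == 1)).map Prod.fst ↔ xs.count v = 1 := by
  have hp : (PySem.List.sorted xs (fun x => x) false).Pairwise (· ≤ ·) := by
    simpa using PySem.List.sorted_pairwise xs (fun x => x)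
  have hcount : (PySem.List.sorted xs (fun x => x) false).count v = xs.count v :=
    (PySem.List.sorted_perm xs (fun x => x) false).count_eq v
  rw [← hcount, ← mem_runs_one_iff _ hp v]
  constructor
  · intro h
    rcases List.mem_map.mp h with ⟨p, hpf, rfl⟩
    rcases List.mem_filter.mp hpf with ⟨hpr, h1⟩
    have h2 : p.2 = 1 := by simpa using h1
    have : p = (p.1, 1) := by rw [← h2]
    rwa [this] at hpr
  · intro h
    exact List.mem_map.mpr ⟨(v, 1), List.mem_filter.mpr ⟨h, by simp⟩, rfl⟩

theorem auto_mark_eq (xs : List String) : auto_mark xs = auto_mark_alt xs := by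
  unfold auto_mark auto_mark_alt
  by_cases h : xs.length < 2
  · simp [h]
  · simp only [h, if_false]
    simp only [getD_foldl_insert_count, getD_init, zero_add, mem_singles_iff]
    split_ifs <;> first | rfl | (exfalso; push_cast at *; omega)

-- ===== VERDICT =====
theorem auto_mark_spec : Claim_equal_auto_mark := by
  intro xs _ _
  unfold Spec_auto_mark
  exact auto_mark_eq xs
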